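-- pv_equiv track=rewrite | github.com/Kruthisver-IronTrex/New_ML_Model | New_Dataset.py | _brand_match
-- ===== SOURCE A (Python) =====
-- BRAND_NAMES = {
--     'google','gmail','youtube','googleplay','apple','icloud','itunes','appstore',
--     'microsoft','outlook','onedrive','office365','skype','teams','meta','facebook',
--     'instagram','whatsapp','messenger','oculus','twitter','tiktok','snapchat',
--     'pinterest','linkedin','amazon','aws','alexa','primevideo','netflix','spotify',
--     'discord','zoom','slack','dropbox','adobe','oracle','salesforce','shopify',
--     'ebay','flipkart','myntra','meesho','alibaba','aliexpress','taobao','walmart',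
--     'target','bestbuy','etsy','lazada','tokopedia','mercadolibre','paypal','stripe',
--     'square','chase','wellsfargo','bankofamerica','citibank','citi','hsbc','barclays',
--     'lloyds','natwest','santander','deutschebank','bnpparibas','ing','rabobank',
--     'usbank','capitalone','tdbank','scotiabank','rbc','sbi','sbionline','statebank',
--     'hdfcbank','hdfc','icicibank','icici','axisbank','axis','kotakbank','kotak',
--     'pnb','bob','canarabank','unionbank','yesbank','indusindbank','federalbank',
--     'paytm','phonepe','gpay','googlepay','amazonpay','mobikwik','freecharge',
--     'razorpay','cashfree','payu','venmo','cashapp','zelle','wise','revolut',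
--     'klarna','afterpay','affirm','airtel','jio','vodafone','bsnl','idea','att',
--     'verizon','tmobile','sprint','comcast','xfinity','bt','o2','orange','binance',
--     'coinbase','kraken','bitfinex','kucoin','okx','bybit','crypto','fedex','ups',
--     'dhl','usps','royalmail','indiapost','bluedart','delhivery',
-- }
--
-- def _levenshtein(a: str, b: str) -> int:
--     if a == b: return 0
--     if not a:  return len(b)
--     if not b:  return len(a)
--     prev = list(range(len(b) + 1))
--     for i, ca in enumerate(a, 1):
--         curr = [i] + [0] * len(b)
--         for j, cb in enumerate(b, 1):
--             curr[j] = min(prev[j] + 1, curr[j-1] + 1,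
--                           prev[j-1] + (0 if ca == cb else 1))
--         prev = curr
--     return prev[-1]
--
-- def _brand_match(domain_token: str) -> bool:
--     if domain_token in BRAND_NAMES:
--         return True
--     if len(domain_token) < 5:
--         return False
--     for brand in BRAND_NAMES:
--         if abs(len(domain_token) - len(brand)) <= 1:
--             if _levenshtein(domain_token, brand) == 1:
--                 return True
--     return False
-- ===== SOURCE B (Python) =====
-- BRAND_NAMES = {
--     'google','gmail','youtube','googleplay','apple','icloud','itunes','appstore',
--     'microsoft','outlook','onedrive','office365','skype','teams','meta','facebook',
--     'instagram','whatsapp','messenger','oculus','twitter','tiktok','snapchat',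
--     'pinterest','linkedin','amazon','aws','alexa','primevideo','netflix','spotify',
--     'discord','zoom','slack','dropbox','adobe','oracle','salesforce','shopify',
--     'ebay','flipkart','myntra','meesho','alibaba','aliexpress','taobao','walmart',
--     'target','bestbuy','etsy','lazada','tokopedia','mercadolibre','paypal','stripe',
--     'square','chase','wellsfargo','bankofamerica','citibank','citi','hsbc','barclays',
--     'lloyds','natwest','santander','deutschebank','bnpparibas','ing','rabobank',
--     'usbank','capitalone','tdbank','scotiabank','rbc','sbi','sbionline','statebank',
--     'hdfcbank','hdfc','icicibank','icici','axisbank','axis','kotakbank','kotak',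
--     'pnb','bob','canarabank','unionbank','yesbank','indusindbank','federalbank',
--     'paytm','phonepe','gpay','googlepay','amazonpay','mobikwik','freecharge',
--     'razorpay','cashfree','payu','venmo','cashapp','zelle','wise','revolut',
--     'klarna','afterpay','affirm','airtel','jio','vodafone','bsnl','idea','att',
--     'verizon','tmobile','sprint','comcast','xfinity','bt','o2','orange','binance',
--     'coinbase','kraken','bitfinex','kucoin','okx','bybit','crypto','fedex','ups',
--     'dhl','usps','royalmail','indiapost','bluedart','delhivery',
-- }
--
-- _ALPHABET = {c for brand in BRAND_NAMES for c in brand}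
--
-- _MAXLEN = max(len(brand) for brand in BRAND_NAMES)
--
-- def _edits1(token):
--     # all strings at Levenshtein distance exactly 1 from token, over the brand alphabet
--     splits = [(token[:i], token[i:]) for i in range(len(token) + 1)]
--     deletes = [L + R[1:] for L, R in splits if R]
--     substitutes = [L + c + R[1:] for L, R in splits if R for c in _ALPHABET if c != R[0]]
--     inserts = [L + c + R for L, R in splits for c in _ALPHABET]
--     return deletes + substitutes + inserts
--
-- def _brand_match(domain_token):
--     if domain_token in BRAND_NAMES:
--         return True
--     if len(domain_token) < 5 or len(domain_token) > _MAXLEN + 1: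
--         # tokens longer than the longest brand + 1 cannot be one edit from any brand
--         return False
--     return any(cand in BRAND_NAMES for cand in _edits1(domain_token))
-- ===== Notes on version B (the rewrite author's own statement) =====
-- stated objective: alternative
-- what changed: Instead of scanning all brands and running a full dynamic-programming Levenshtein matrix per brand, B generates every string at Levenshtein distance exactly 1 from the token (deletions, substitutions and insertions over the alphabet of characters occurring in the brand names) and tests each candidate for membership in the brand set, after first rejecting tokens longer than the longest brand plus one (no brand can then be one edit away); the exact-membership check and the len<5 guard are unchanged.
import Mathlib
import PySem

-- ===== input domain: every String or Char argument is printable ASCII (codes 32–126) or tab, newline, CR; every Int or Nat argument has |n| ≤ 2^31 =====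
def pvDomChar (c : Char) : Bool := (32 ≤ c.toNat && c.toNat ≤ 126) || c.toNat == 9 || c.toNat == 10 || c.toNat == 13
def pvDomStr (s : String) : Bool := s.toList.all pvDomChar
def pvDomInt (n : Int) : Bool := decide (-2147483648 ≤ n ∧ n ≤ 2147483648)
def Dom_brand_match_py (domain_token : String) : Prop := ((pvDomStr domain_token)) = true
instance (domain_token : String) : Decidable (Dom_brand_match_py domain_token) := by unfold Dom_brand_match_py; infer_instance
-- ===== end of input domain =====

-- B replaces A's per-brand dynamic-programming Levenshtein scan by candidate enumeration: it
-- generates every string at edit distance exactly 1 from the token (over the brand alphabet)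
-- and tests each for membership in the brand set; objective: alternative.

-- ===== PORT A =====

-- the module constant BRAND_NAMES (a Python set of distinct literals), in literal order
def pvBrands : List String := [
  "google", "gmail", "youtube", "googleplay", "apple", "icloud", "itunes", "appstore",
  "microsoft", "outlook", "onedrive", "office365", "skype", "teams", "meta", "facebook",
  "instagram", "whatsapp", "messenger", "oculus", "twitter", "tiktok", "snapchat", "pinterest",
  "linkedin", "amazon", "aws", "alexa", "primevideo", "netflix", "spotify", "discord",
  "zoom", "slack", "dropbox", "adobe", "oracle", "salesforce", "shopify", "ebay",
  "flipkart", "myntra", "meesho", "alibaba", "aliexpress", "taobao", "walmart", "target",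
  "bestbuy", "etsy", "lazada", "tokopedia", "mercadolibre", "paypal", "stripe", "square",
  "chase", "wellsfargo", "bankofamerica", "citibank", "citi", "hsbc", "barclays", "lloyds",
  "natwest", "santander", "deutschebank", "bnpparibas", "ing", "rabobank", "usbank", "capitalone",
  "tdbank", "scotiabank", "rbc", "sbi", "sbionline", "statebank", "hdfcbank", "hdfc",
  "icicibank", "icici", "axisbank", "axis", "kotakbank", "kotak", "pnb", "bob",
  "canarabank", "unionbank", "yesbank", "indusindbank", "federalbank", "paytm", "phonepe", "gpay",
  "googlepay", "amazonpay", "mobikwik", "freecharge", "razorpay", "cashfree", "payu", "venmo",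
  "cashapp", "zelle", "wise", "revolut", "klarna", "afterpay", "affirm", "airtel",
  "jio", "vodafone", "bsnl", "idea", "att", "verizon", "tmobile", "sprint",
  "comcast", "xfinity", "bt", "o2", "orange", "binance", "coinbase", "kraken",
  "bitfinex", "kucoin", "okx", "bybit", "crypto", "fedex", "ups", "dhl",
  "usps", "royalmail", "indiapost", "bluedart", "delhivery"
]

-- inner loop of _levenshtein: for j, cb in enumerate(b, 1): curr[j] = min(prev[j]+1, curr[j-1]+1, prev[j-1]+δ).
-- j advances by one, so prev[j-1]/prev[j] are the head of the carried remainder of prev and the cell after it,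
-- and curr[j-1] is the cell produced just before (carried as `last`) — same values as Python's index accesses.
-- All DP values are nonnegative Python ints, represented exactly as Nat.
def pvEdCells (ca : Char) : List Nat → Nat → List Char → List Nat
  | _, _, [] => []
  | prev, last, cb :: bs =>
    let c := min ((prev.drop 1).headD 0 + 1)
               (min (last + 1) (prev.headD 0 + (if ca == cb then 0 else 1)))
    c :: pvEdCells ca (prev.drop 1) c bs

-- outer loop: for i, ca in enumerate(a, 1): curr = [i] + cells; prev = curr
def pvLevLoop : List Char → List Char → List Nat → Nat → List Nat
  | [], _, prev, _ => prev
  | ca :: as_, bl, prev, i => pvLevLoop as_ bl (i :: pvEdCells ca prev i bl) (i + 1)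

-- _levenshtein(a, b); `prev[-1]` is the last cell (prev is always nonempty)
def pvLev (a b : String) : Nat :=
  if a == b then 0
  else if a.toList.isEmpty then b.toList.length
  else if b.toList.isEmpty then a.toList.length
  else (pvLevLoop a.toList b.toList (List.range (b.toList.length + 1)) 1).getLastD 0

def brand_match_py (domain_token : String) : Bool :=
  if pvBrands.contains domain_token then true
  else if PySem.Str.len domain_token < 5 then false
  else pvBrands.any (fun brand =>
    decide (|PySem.Str.len domain_token - PySem.Str.len brand| ≤ 1) &&
    (pvLev domain_token brand == 1))

-- ===== PORT B =====

-- _ALPHABET = {c for brand in BRAND_NAMES for c in brand} : the set of characters of all brands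
def pvAlphabet : PySem.Set Char := PySem.Set.ofList (pvBrands.flatMap String.toList)

-- _MAXLEN = max(len(brand) for brand in BRAND_NAMES); pvBrands is nonempty, so the max exists
def pvMaxLen : Int := (PySem.List.max? (pvBrands.map PySem.Str.len) (fun x => x)).getD 0

-- splits = [(token[:i], token[i:]) for i in range(len(token) + 1)]
def pvSplits (t : List Char) : List (List Char × List Char) :=
  (List.range (t.length + 1)).map (fun i => (t.take i, t.drop i))

-- _edits1: deletes ++ substitutes ++ inserts, in Source B's comprehension order
def pvEdits1 (t : List Char) : List (List Char) :=
  let splits := pvSplits t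
  let deletes := splits.filterMap (fun p =>
    match p.2 with
    | [] => none
    | _ :: R => some (p.1 ++ R))
  let substitutes := splits.flatMap (fun p =>
    match p.2 with
    | [] => []
    | r :: R => (pvAlphabet.filter (fun c => c != r)).map (fun c => p.1 ++ c :: R))
  let inserts := splits.flatMap (fun p =>
    pvAlphabet.map (fun c => p.1 ++ c :: p.2))
  deletes ++ substitutes ++ inserts

def brand_match_py_alt (domain_token : String) : Bool :=
  if pvBrands.contains domain_token then true
  else if PySem.Str.len domain_token < 5 ∨ pvMaxLen + 1 < PySem.Str.len domain_token then false
  else (pvEdits1 domain_token.toList).any (fun cand => pvBrands.contains (String.ofList cand))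

-- ===== PRECONDITION & SPEC =====
def Spec_brand_match_py (domain_token : String) (out : Bool) : Prop := out = brand_match_py_alt domain_token
instance (domain_token : String) (out : Bool) : Decidable (Spec_brand_match_py domain_token out) := by unfold Spec_brand_match_py; infer_instance

-- ===== CLAIM (what is proved, stated in full; the proofs are below) =====
def Claim_equal_brand_match_py : Prop := ∀ (domain_token : String), Dom_brand_match_py domain_token → Spec_brand_match_py domain_token (brand_match_py domain_token)

-- ===== LEMMAS AND PROOFS =====

-- reference edit distance, recursing on the FRONT of both lists
def pvEd : List Char → List Char → Nat
  | [], b => b.length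
  | a, [] => a.length
  | x :: a, y :: b =>
    min (pvEd a (y :: b) + 1) (min (pvEd (x :: a) b + 1) (pvEd a b + (if x = y then 0 else 1)))
termination_by a b => a.length + b.length

-- structural one-edit test, a proof-side bridge between pvEd = 1 and membership in pvEdits1
def pvOneEdit : List Char → List Char → Bool
  | [], [] => false
  | [], b => b.length == 1
  | a, [] => a.length == 1
  | x :: a, y :: b => if x == y then pvOneEdit a b else (a == b || a == y :: b || x :: a == b)

theorem pvEd_nil (b : List Char) : pvEd [] b = b.length := by rw [pvEd.eq_def]

theorem pvEd_cons_nil (x : Char) (a : List Char) : pvEd (x :: a) [] = a.length + 1 := by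
  rw [pvEd.eq_def]; rfl

theorem pvEd_cons_cons (x y : Char) (a b : List Char) : pvEd (x :: a) (y :: b) =
    min (pvEd a (y :: b) + 1) (min (pvEd (x :: a) b + 1) (pvEd a b + (if x = y then 0 else 1))) := by
  rw [pvEd.eq_def]

theorem pvEd_nil_right (a : List Char) : pvEd a [] = a.length := by
  cases a with
  | nil => rw [pvEd_nil]
  | cons x a => rw [pvEd_cons_nil]; rfl

theorem pvEd_self (a : List Char) : pvEd a a = 0 := by
  induction a with
  | nil => rw [pvEd_nil]; rfl
  | cons x a ih => rw [pvEd_cons_cons]; simp [ih]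

theorem pvEd_eq_zero_iff (a : List Char) : ∀ b, pvEd a b = 0 ↔ a = b := by
  induction a with
  | nil => intro b; cases b <;> simp [pvEd_nil]
  | cons x a ih =>
    intro b
    cases b with
    | nil => simp [pvEd_cons_nil]
    | cons y b =>
      rw [pvEd_cons_cons]
      constructor
      · intro h
        by_cases hxy : x = y
        · subst hxy
          rw [if_pos rfl] at h
          have h3 : pvEd a b = 0 := by omega
          rw [(ih b).mp h3]
        · rw [if_neg hxy] at h; omega
      · intro h
        injection h with h1 h2
        subst h1; subst h2
        simp [pvEd_self]

theorem pvEd_cons_left_le (x : Char) (a b : List Char) : pvEd (x :: a) b ≤ pvEd a b + 1 := by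
  cases b with
  | nil => rw [pvEd_cons_nil, pvEd_nil_right]
  | cons y b => rw [pvEd_cons_cons]; omega

theorem pvEd_cons_right_le (y : Char) (a b : List Char) : pvEd a (y :: b) ≤ pvEd a b + 1 := by
  cases a with
  | nil => rw [pvEd_nil, pvEd_nil]; simp
  | cons x a => rw [pvEd_cons_cons]; omega

-- the distance-1 characterisation: pvEd = 1 exactly where the structural one-edit test succeeds
theorem pvEd_one_iff (a : List Char) : ∀ b, pvEd a b = 1 ↔ pvOneEdit a b = true := by
  induction a with
  | nil =>
    intro b; cases b with
    | nil => simp [pvEd_nil, pvOneEdit]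
    | cons y b => simp [pvEd_nil, pvOneEdit]
  | cons x a ih =>
    intro b
    cases b with
    | nil =>
      rw [pvEd_cons_nil]
      cases a <;> simp [pvOneEdit]
    | cons y b =>
      by_cases hxy : x = y
      · subst hxy
        have key : pvEd (x :: a) (x :: b) = 1 ↔ pvEd a b = 1 := by
          constructor
          · intro h1
            rw [pvEd_cons_cons, if_pos rfl] at h1
            rcases Nat.lt_or_ge (pvEd a b) 2 with hlt | hge
            · have h0 : pvEd a b ≠ 0 := by
                intro h0
                have hab : a = b := (pvEd_eq_zero_iff a b).mp h0
                subst hab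
                have := pvEd_self a
                omega
              omega
            · exfalso
              have h2 : pvEd a (x :: b) = 0 ∨ pvEd (x :: a) b = 0 := by omega
              rcases h2 with h2 | h2
              · have he : a = x :: b := (pvEd_eq_zero_iff _ _).mp h2
                subst he
                have := pvEd_cons_left_le x b b
                have := pvEd_self b
                omega
              · have he : x :: a = b := (pvEd_eq_zero_iff _ _).mp h2
                subst he
                have := pvEd_cons_right_le x a a
                have := pvEd_self a
                omega
          · intro h1
            have hne : pvEd (x :: a) (x :: b) ≠ 0 := by
              intro h0
              have he : x :: a = x :: b := (pvEd_eq_zero_iff _ _).mp h0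
              injection he with _ h2
              subst h2
              have := pvEd_self a
              omega
            rw [pvEd_cons_cons, if_pos rfl] at hne ⊢
            omega
        rw [key, ih b]
        simp [pvOneEdit]
      · rw [pvEd_cons_cons, if_neg hxy]
        have e1 := pvEd_eq_zero_iff a (y :: b)
        have e2 := pvEd_eq_zero_iff (x :: a) b
        have e3 := pvEd_eq_zero_iff a b
        rw [show pvOneEdit (x :: a) (y :: b) = (a == b || a == y :: b || x :: a == b) by
              simp only [pvOneEdit]
              rw [if_neg (by simpa using hxy)]]
        simp only [Bool.or_eq_true, beq_iff_eq]
        constructor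
        · intro h
          have hsplit : pvEd a (y :: b) = 0 ∨ pvEd (x :: a) b = 0 ∨ pvEd a b = 0 := by omega
          rcases hsplit with h0 | h0 | h0
          · simp [e1.mp h0]
          · simp [e2.mp h0]
          · simp [e3.mp h0]
        · rintro ((h0 | h0) | h0)
          · have := e3.mpr h0; omega
          · have := e1.mpr h0; omega
          · have := e2.mpr h0; omega

-- one edit as a decomposition proposition: substitution, deletion or insertion at a split point
def pvSpecOne (a b : List Char) : Prop :=
  (∃ u x y v, x ≠ y ∧ a = u ++ x :: v ∧ b = u ++ y :: v) ∨
  (∃ u x v, a = u ++ x :: v ∧ b = u ++ v) ∨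
  (∃ u y v, a = u ++ v ∧ b = u ++ y :: v)

theorem pvSpecOne_cons_same (x : Char) (a b : List Char) :
    pvSpecOne (x :: a) (x :: b) ↔ pvSpecOne a b := by
  constructor
  · rintro (⟨u, c, d, v, hcd, ha, hb⟩ | ⟨u, c, v, ha, hb⟩ | ⟨u, d, v, ha, hb⟩)
    · cases u with
      | nil =>
        simp at ha hb
        exact absurd (ha.1.symm.trans hb.1) hcd
      | cons u0 u =>
        simp at ha hb
        exact Or.inl ⟨u, c, d, v, hcd, ha.2, hb.2⟩
    · cases u with
      | nil =>
        simp at ha hb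
        exact Or.inr (Or.inl ⟨[], x, b, by simp [ha.2, ← hb], by simp⟩)
      | cons u0 u =>
        simp at ha hb
        exact Or.inr (Or.inl ⟨u, c, v, ha.2, hb.2⟩)
    · cases u with
      | nil =>
        simp at ha hb
        exact Or.inr (Or.inr ⟨[], x, a, by simp, by simp [hb.2, ← ha]⟩)
      | cons u0 u =>
        simp at ha hb
        exact Or.inr (Or.inr ⟨u, d, v, ha.2, hb.2⟩)
  · rintro (⟨u, c, d, v, hcd, ha, hb⟩ | ⟨u, c, v, ha, hb⟩ | ⟨u, d, v, ha, hb⟩)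
    · exact Or.inl ⟨x :: u, c, d, v, hcd, by simp [ha], by simp [hb]⟩
    · exact Or.inr (Or.inl ⟨x :: u, c, v, by simp [ha], by simp [hb]⟩)
    · exact Or.inr (Or.inr ⟨x :: u, d, v, by simp [ha], by simp [hb]⟩)

theorem pvOneEdit_iff_spec (a : List Char) : ∀ b, pvOneEdit a b = true ↔ pvSpecOne a b := by
  induction a with
  | nil =>
    intro b
    cases b with
    | nil =>
      simp only [pvOneEdit, pvSpecOne]
      constructor
      · intro h; cases h
      · rintro (⟨u, c, d, v, _, ha, _⟩ | ⟨u, c, v, ha, _⟩ | ⟨u, d, v, _, hb⟩)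
        · simp at ha
        · simp at ha
        · simp at hb
    | cons y b =>
      simp only [pvOneEdit, pvSpecOne]
      constructor
      · intro h
        have hb0 : b = [] := by simpa using h
        subst hb0
        exact Or.inr (Or.inr ⟨[], y, [], by simp, by simp⟩)
      · rintro (⟨u, c, d, v, _, ha, _⟩ | ⟨u, c, v, ha, _⟩ | ⟨u, d, v, ha, hb⟩)
        · simp at ha
        · simp at ha
        · have hu : u = [] := by
            rcases List.append_eq_nil_iff.mp ha.symm with ⟨h1, _⟩; exact h1
          have hv : v = [] := by
            rcases List.append_eq_nil_iff.mp ha.symm with ⟨_, h2⟩; exact h2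
          subst hu; subst hv
          simp at hb
          simp [hb.2]
  | cons x a ih =>
    intro b
    cases b with
    | nil =>
      simp only [pvOneEdit, pvSpecOne]
      constructor
      · intro h
        have ha0 : a = [] := by simpa using h
        subst ha0
        exact Or.inr (Or.inl ⟨[], x, [], by simp, by simp⟩)
      · rintro (⟨u, c, d, v, _, _, hb⟩ | ⟨u, c, v, ha, hb⟩ | ⟨u, d, v, _, hb⟩)
        · simp at hb
        · have hu : u = [] := by
            rcases List.append_eq_nil_iff.mp hb.symm with ⟨h1, _⟩; exact h1
          have hv : v = [] := by
            rcases List.append_eq_nil_iff.mp hb.symm with ⟨_, h2⟩; exact h2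
          subst hu; subst hv
          simp at ha
          simp [ha.2]
        · simp at hb
    | cons y b =>
      by_cases hxy : x = y
      · subst hxy
        rw [show pvOneEdit (x :: a) (x :: b) = pvOneEdit a b by simp [pvOneEdit]]
        rw [ih b, pvSpecOne_cons_same]
      · rw [show pvOneEdit (x :: a) (y :: b) = (a == b || a == y :: b || x :: a == b) by
            simp only [pvOneEdit]
            rw [if_neg (by simpa using hxy)]]
        simp only [Bool.or_eq_true, beq_iff_eq]
        constructor
        · rintro ((h0 | h0) | h0)
          · exact Or.inl ⟨[], x, y, b, hxy, by simp [h0], by simp⟩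
          · exact Or.inr (Or.inl ⟨[], x, a, by simp, by simp [h0]⟩)
          · exact Or.inr (Or.inr ⟨[], y, x :: a, by simp, by simp [← h0]⟩)
        · rintro (⟨u, c, d, v, hcd, ha, hb⟩ | ⟨u, c, v, ha, hb⟩ | ⟨u, d, v, ha, hb⟩)
          · cases u with
            | cons u0 u =>
              exfalso
              simp at ha hb
              exact hxy (ha.1.trans hb.1.symm)
            | nil =>
              simp at ha hb
              exact Or.inl (Or.inl (by rw [ha.2, hb.2]))
          · cases u with
            | cons u0 u =>
              exfalso
              simp at ha hb
              exact hxy (ha.1.trans hb.1.symm)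
            | nil =>
              simp at ha hb
              exact Or.inl (Or.inr (by rw [ha.2, ← hb]))
          · cases u with
            | cons u0 u =>
              exfalso
              simp at ha hb
              exact hxy (ha.1.trans hb.1.symm)
            | nil =>
              simp at ha hb
              exact Or.inr (by rw [hb.2, ← ha])

theorem pvSpecOne_reverse_of (a b : List Char) (h : pvSpecOne a b) :
    pvSpecOne a.reverse b.reverse := by
  rcases h with ⟨u, c, d, v, hcd, ha, hb⟩ | ⟨u, c, v, ha, hb⟩ | ⟨u, d, v, ha, hb⟩
  · exact Or.inl ⟨v.reverse, c, d, u.reverse, hcd, by simp [ha], by simp [hb]⟩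
  · exact Or.inr (Or.inl ⟨v.reverse, c, u.reverse, by simp [ha], by simp [hb]⟩)
  · exact Or.inr (Or.inr ⟨v.reverse, d, u.reverse, by simp [ha], by simp [hb]⟩)

theorem pvOneEdit_reverse (a b : List Char) :
    pvOneEdit a.reverse b.reverse = pvOneEdit a b := by
  rw [Bool.eq_iff_iff, pvOneEdit_iff_spec, pvOneEdit_iff_spec]
  constructor
  · intro h
    have h2 := pvSpecOne_reverse_of _ _ h
    simpa using h2
  · exact pvSpecOne_reverse_of a b

-- row specification: cell j of the row for reversed a-prefix ur is pvEd ur (reversed processed b-prefix)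
def pvRowSpec (ur : List Char) : List Char → List Char → List Nat
  | wr, [] => [pvEd ur wr]
  | wr, cb :: bs => pvEd ur wr :: pvRowSpec ur (cb :: wr) bs

theorem pvRowSpec_headD (ur wr bl : List Char) : (pvRowSpec ur wr bl).headD 0 = pvEd ur wr := by
  cases bl <;> simp [pvRowSpec]

theorem pvEdCells_rowSpec (ca : Char) (bl : List Char) : ∀ (ur wr : List Char),
    pvEd (ca :: ur) wr :: pvEdCells ca (pvRowSpec ur wr bl) (pvEd (ca :: ur) wr) bl
      = pvRowSpec (ca :: ur) wr bl := by
  induction bl with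
  | nil => intro ur wr; simp [pvEdCells, pvRowSpec]
  | cons cb bs ih =>
    intro ur wr
    have hcell :
        min ((pvRowSpec ur (cb :: wr) bs).headD 0 + 1)
          (min (pvEd (ca :: ur) wr + 1) (pvEd ur wr + (if ca == cb then 0 else 1)))
          = pvEd (ca :: ur) (cb :: wr) := by
      rw [pvRowSpec_headD, pvEd_cons_cons]
      by_cases h : ca = cb <;> simp [h]
    simp only [pvRowSpec, pvEdCells, List.drop_succ_cons, List.drop_zero, List.headD_cons]
    rw [hcell, ih ur (cb :: wr)]

theorem pvLevLoop_rowSpec (bl : List Char) : ∀ (as_ ur : List Char),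
    pvLevLoop as_ bl (pvRowSpec ur [] bl) (ur.length + 1)
      = pvRowSpec (as_.reverse ++ ur) [] bl := by
  intro as_
  induction as_ with
  | nil => intro ur; simp [pvLevLoop]
  | cons ca as_ ih =>
    intro ur
    simp only [pvLevLoop]
    rw [show (ur.length + 1) :: pvEdCells ca (pvRowSpec ur [] bl) (ur.length + 1) bl
          = pvRowSpec (ca :: ur) [] bl by
        rw [show ur.length + 1 = pvEd (ca :: ur) [] by rw [pvEd_nil_right]; rfl]
        exact pvEdCells_rowSpec ca bl ur []]
    rw [show ur.length + 1 + 1 = (ca :: ur).length + 1 by simp]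
    rw [ih (ca :: ur)]
    simp

theorem pvRowSpec_nil (bl : List Char) : ∀ wr : List Char,
    pvRowSpec [] wr bl = List.range' wr.length (bl.length + 1) := by
  induction bl with
  | nil => intro wr; simp [pvRowSpec, pvEd_nil, List.range']
  | cons cb bs ih =>
    intro wr
    rw [show (cb :: bs).length + 1 = (bs.length + 1) + 1 by simp, List.range'_succ]
    simp only [pvRowSpec, pvEd_nil]
    rw [show wr.length + 1 = (cb :: wr).length by simp, ih (cb :: wr)]

theorem pvRowSpec_getLastD (bl : List Char) : ∀ (ur wr : List Char) (d : Nat),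
    (pvRowSpec ur wr bl).getLastD d = pvEd ur (bl.reverse ++ wr) := by
  induction bl with
  | nil => intro ur wr d; simp [pvRowSpec]
  | cons cb bs ih =>
    intro ur wr d
    simp only [pvRowSpec, List.getLastD_cons]
    rw [ih ur (cb :: wr) (pvEd ur wr)]
    simp

theorem pvLev_eq_pvEd (a b : String) :
    pvLev a b = pvEd a.toList.reverse b.toList.reverse := by
  unfold pvLev
  by_cases hab : a = b
  · subst hab
    simp [pvEd_self]
  · rw [if_neg (by simpa using hab)]
    by_cases ha : a.toList.isEmpty
    · rw [if_pos ha]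
      rw [List.isEmpty_iff] at ha
      simp [ha, pvEd_nil]
    · rw [if_neg (by simpa using ha)]
      by_cases hb : b.toList.isEmpty
      · rw [if_pos hb]
        rw [List.isEmpty_iff] at hb
        simp [hb, pvEd_nil_right]
      · rw [if_neg (by simpa using hb)]
        rw [show List.range (b.toList.length + 1) = pvRowSpec [] [] b.toList by
              rw [pvRowSpec_nil, List.range_eq_range']; rfl]
        rw [show (1 : Nat) = ([] : List Char).length + 1 by rfl]
        rw [pvLevLoop_rowSpec, pvRowSpec_getLastD]
        simp

-- pvLev = 1 exactly on the one-edit decompositions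
theorem pvLev_one_iff (a b : String) : pvLev a b = 1 ↔ pvSpecOne a.toList b.toList := by
  rw [pvLev_eq_pvEd, pvEd_one_iff, pvOneEdit_reverse, pvOneEdit_iff_spec]

-- a one-edit pair has lengths within 1 of each other
theorem pvSpecOne_len (a b : List Char) (h : pvSpecOne a b) :
    a.length ≤ b.length + 1 ∧ b.length ≤ a.length + 1 := by
  rcases h with ⟨u, c, d, v, _, ha, hb⟩ | ⟨u, c, v, ha, hb⟩ | ⟨u, d, v, ha, hb⟩
  · subst ha; subst hb
    simp only [List.length_append, List.length_cons]
    omega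
  · subst ha; subst hb
    simp only [List.length_append, List.length_cons]
    omega
  · subst ha; subst hb
    simp only [List.length_append, List.length_cons]
    omega

-- every split of t = u ++ v occurs in pvSplits t
theorem mem_pvSplits (u v : List Char) : (u, v) ∈ pvSplits (u ++ v) := by
  unfold pvSplits
  refine List.mem_map.mpr ⟨u.length, List.mem_range.mpr (by simp), ?_⟩
  rw [List.take_left, List.drop_left]

-- conversely a member of pvSplits t is a split of t
theorem pvSplits_eq (t : List Char) (p : List Char × List Char) (h : p ∈ pvSplits t) :
    t = p.1 ++ p.2 := by
  unfold pvSplits at h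
  rcases List.mem_map.mp h with ⟨i, _, rfl⟩
  simp

-- every character of a brand is in the alphabet
theorem mem_pvAlphabet_of (b : String) (hb : b ∈ pvBrands) (c : Char) (hc : c ∈ b.toList) :
    c ∈ pvAlphabet := by
  unfold pvAlphabet
  rw [PySem.Set.mem_ofList]
  exact List.mem_flatMap.mpr ⟨b, hb, hc⟩

-- proof-side names for the three candidate generators of pvEdits1
def pvDel (p : List Char × List Char) : Option (List Char) :=
  match p.2 with
  | [] => none
  | _ :: R => some (p.1 ++ R)

def pvSub (p : List Char × List Char) : List (List Char) :=
  match p.2 with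
  | [] => []
  | r :: R => (pvAlphabet.filter (fun c => c != r)).map (fun c => p.1 ++ c :: R)

def pvIns (p : List Char × List Char) : List (List Char) :=
  pvAlphabet.map (fun c => p.1 ++ c :: p.2)

theorem pvEdits1_eq (t : List Char) : pvEdits1 t =
    (pvSplits t).filterMap pvDel ++ ((pvSplits t).flatMap pvSub ++ (pvSplits t).flatMap pvIns) := by
  simp only [pvEdits1, List.append_assoc]
  rfl

-- completeness: any one-edit decomposition landing on a brand is generated by pvEdits1
theorem mem_edits1_of_spec (a : List Char) (b : String) (hb : b ∈ pvBrands)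
    (h : pvSpecOne a b.toList) : b.toList ∈ pvEdits1 a := by
  rw [pvEdits1_eq, List.mem_append, List.mem_append]
  rcases h with ⟨u, x, y, v, hxy, ha, hbl⟩ | ⟨u, x, v, ha, hbl⟩ | ⟨u, y, v, ha, hbl⟩
  · subst ha
    refine Or.inr (Or.inl (List.mem_flatMap.mpr ⟨(u, x :: v), mem_pvSplits u (x :: v), ?_⟩))
    show b.toList ∈ (pvAlphabet.filter (fun c => c != x)).map (fun c => u ++ c :: v)
    refine List.mem_map.mpr ⟨y, List.mem_filter.mpr ⟨?_, by simp [Ne.symm hxy]⟩, hbl.symm⟩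
    exact mem_pvAlphabet_of b hb y (by simp [hbl])
  · subst ha
    refine Or.inl (List.mem_filterMap.mpr ⟨(u, x :: v), mem_pvSplits u (x :: v), ?_⟩)
    show some (u ++ v) = some b.toList
    rw [hbl]
  · subst ha
    refine Or.inr (Or.inr (List.mem_flatMap.mpr ⟨(u, v), mem_pvSplits u v, ?_⟩))
    show b.toList ∈ pvAlphabet.map (fun c => u ++ c :: v)
    exact List.mem_map.mpr ⟨y, mem_pvAlphabet_of b hb y (by simp [hbl]), hbl.symm⟩

-- soundness: everything pvEdits1 generates is one edit away from the token
theorem spec_of_mem_edits1 (a cand : List Char) (h : cand ∈ pvEdits1 a) : pvSpecOne a cand := by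
  rw [pvEdits1_eq, List.mem_append, List.mem_append] at h
  rcases h with h | h | h
  · rcases List.mem_filterMap.mp h with ⟨⟨L, R⟩, hp, he⟩
    have ht := pvSplits_eq a (L, R) hp
    cases R with
    | nil => exact absurd he (by simp [pvDel])
    | cons x R =>
      have hx : L ++ R = cand := by
        have : some (L ++ R) = some cand := he
        exact Option.some.inj this
      exact Or.inr (Or.inl ⟨L, x, R, ht, hx.symm⟩)
  · rcases List.mem_flatMap.mp h with ⟨⟨L, R⟩, hp, hm⟩
    have ht := pvSplits_eq a (L, R) hp
    cases R with
    | nil => exact absurd hm (by simp [pvSub])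
    | cons r R =>
      have hm' : cand ∈ (pvAlphabet.filter (fun c => c != r)).map (fun c => L ++ c :: R) := hm
      rcases List.mem_map.mp hm' with ⟨c, hc, rfl⟩
      have hcr : c ≠ r := by simpa using (List.mem_filter.mp hc).2
      exact Or.inl ⟨L, r, c, R, Ne.symm hcr, ht, rfl⟩
  · rcases List.mem_flatMap.mp h with ⟨⟨L, R⟩, hp, hm⟩
    have ht := pvSplits_eq a (L, R) hp
    rcases List.mem_map.mp hm with ⟨c, _, rfl⟩
    exact Or.inr (Or.inr ⟨L, c, R, ht, rfl⟩)

-- the two existential searches agree: a brand at distance 1 ↔ a generated candidate that is a brand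
theorem pv_any_eq (s : String) :
    (pvBrands.any (fun brand =>
        decide (|PySem.Str.len s - PySem.Str.len brand| ≤ 1) && (pvLev s brand == 1)))
      = ((pvEdits1 s.toList).any (fun cand => pvBrands.contains (String.ofList cand))) := by
  rw [Bool.eq_iff_iff]
  simp only [List.any_eq_true, Bool.and_eq_true, beq_iff_eq, decide_eq_true_eq,
    List.contains_iff_mem]
  constructor
  · rintro ⟨b, hb, _, hlev⟩
    refine ⟨b.toList, mem_edits1_of_spec s.toList b hb ((pvLev_one_iff s b).mp hlev), ?_⟩
    simpa using hb
  · rintro ⟨cand, hcand, hcont⟩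
    have hspec := spec_of_mem_edits1 s.toList cand hcand
    have hbt : (String.ofList cand).toList = cand := by simp
    refine ⟨String.ofList cand, hcont, ?_, (pvLev_one_iff s (String.ofList cand)).mpr (by rw [hbt]; exact hspec)⟩
    have hlen := pvSpecOne_len s.toList cand hspec
    simp only [PySem.Str.len_eq, hbt]
    rw [abs_le]
    constructor <;> omega

-- no brand is longer than pvMaxLen
theorem pv_len_le_maxLen (b : String) (hb : b ∈ pvBrands) : PySem.Str.len b ≤ pvMaxLen := by
  cases heq : PySem.List.max? (pvBrands.map PySem.Str.len) (fun x => x) with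
  | none =>
    exfalso
    have := (PySem.List.max?_eq_none_iff _ _).mp heq
    rw [List.map_eq_nil_iff] at this
    rw [this] at hb
    exact absurd hb (List.not_mem_nil)
  | some m =>
    have hle := PySem.List.max?_isMax heq (PySem.Str.len b) (List.mem_map.mpr ⟨b, hb, rfl⟩)
    unfold pvMaxLen
    rw [heq]
    exact hle

-- beyond the length window, A's per-brand filter rejects every brand
theorem pv_any_false (s : String) (hbig : pvMaxLen + 1 < PySem.Str.len s) :
    (pvBrands.any (fun brand =>
        decide (|PySem.Str.len s - PySem.Str.len brand| ≤ 1) && (pvLev s brand == 1))) = false := by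
  rw [List.any_eq_false]
  intro b hb
  have hlen := pv_len_le_maxLen b hb
  have : (decide (|PySem.Str.len s - PySem.Str.len b| ≤ 1)) = false := by
    apply decide_eq_false
    rw [abs_le]
    intro hcon
    omega
  rw [this, Bool.false_and]
  exact Bool.false_ne_true

-- ===== VERDICT (by name: the statement is the Claim_ definition above) =====
theorem brand_match_py_spec : Claim_equal_brand_match_py := by
  intro s _
  unfold Spec_brand_match_py brand_match_py brand_match_py_alt
  by_cases hc : pvBrands.contains s = true
  · rw [if_pos hc, if_pos hc]
  · rw [if_neg hc, if_neg hc]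
    by_cases hl : PySem.Str.len s < 5
    · rw [if_pos hl, if_pos (Or.inl hl)]
    · rw [if_neg hl]
      by_cases hbig : pvMaxLen + 1 < PySem.Str.len s
      · rw [if_pos (Or.inr hbig), pv_any_false s hbig]
      · rw [if_neg (by rintro (h | h); exact hl h; exact hbig h), pv_any_eq]
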